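-- pv_equiv track=rewrite | github.com/DayAlgorithm/CodingTest | 1차_코딩테스트/곽용진/1_가장 많이 받은 선물.py | solution
-- ===== SOURCE A (Python) =====
-- def solution(friends, gifts):
--     graph = [[0 for _ in range(len(friends))] for _ in range(len(friends))]
--     gift_indi = [[0, 0, 0] for _ in range(len(friends))]
--     chk = dict()
--     for i in range(len(friends)): # muzi 넣으면 인덱스 반환
--         chk[friends[i]] = i
--
--     for i in range(len(gifts)):
--         giver, receiver = gifts[i].split()
--         graph[chk[giver]][chk[receiver]] += 1 # 준 사람, 받은 사람 표시
--         gift_indi[chk[giver]][0] += 1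
--         gift_indi[chk[receiver]][1] += 1
--
--     for i in range(len(gift_indi)):
--         gift_indi[i][2] = gift_indi[i][0] - gift_indi[i][1]
--
--     result = [0] * (len(friends))
--
--     for i in range(len(graph)):
--         gift_cnt = 0
--         for j in range(len(graph)):
--             if i == j:
--                 continue
--
--             if graph[i][j] > graph[j][i]:
--                 gift_cnt += 1
--
--             elif graph[i][j] == graph[j][i]:
--                 if gift_indi[i][2] > gift_indi[j][2]:
--                     gift_cnt += 1
--         result[i] = gift_cnt
--
--     return max(result)
-- ===== SOURCE B (Python) =====
-- def solution(friends, gifts):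
--     n = len(friends)
--     idx = {}
--     for i, name in enumerate(friends):
--         idx[name] = i
--     score = [0] * n
--     cnt = {}
--     for g in gifts:
--         a, b = g.split()
--         i, j = idx[a], idx[b]
--         score[i] += 1
--         score[j] -= 1
--         cnt[(i, j)] = cnt.get((i, j), 0) + 1
--     # base wins: number of friends with a strictly smaller net score,
--     # via one sort (first index of each value in the sorted score list)
--     ss = sorted(score)
--     first = {}
--     for r in range(n - 1, -1, -1):
--         first[ss[r]] = r
--     wins = [first[s] for s in score]
--     # correct only the sparse pairs whose direct gift counts are asymmetric
--     done = set()
--     for a, b in cnt: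
--         if a == b:
--             continue
--         i, j = (a, b) if a < b else (b, a)
--         if (i, j) in done:
--             continue
--         done.add((i, j))
--         cij = cnt.get((i, j), 0)
--         cji = cnt.get((j, i), 0)
--         if cij != cji:
--             if score[i] > score[j]:
--                 wins[i] -= 1
--             elif score[j] > score[i]:
--                 wins[j] -= 1
--             wins[i if cij > cji else j] += 1
--     return max(wins)
-- ===== Notes on version B (the rewrite author's own statement) =====
-- stated objective: alternative
-- what changed: B drops A's NxN head-to-head double scan entirely: it sorts the net gift scores once and reads each friend's base win count as the rank of their score (number of strictly smaller scores), then corrects only the sparse unordered pairs whose directed gift counts are asymmetric (one +-1 adjustment per such pair, found via a (giver,receiver) counter), instead of comparing every ordered pair in an N x N matrix.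
import Mathlib
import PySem

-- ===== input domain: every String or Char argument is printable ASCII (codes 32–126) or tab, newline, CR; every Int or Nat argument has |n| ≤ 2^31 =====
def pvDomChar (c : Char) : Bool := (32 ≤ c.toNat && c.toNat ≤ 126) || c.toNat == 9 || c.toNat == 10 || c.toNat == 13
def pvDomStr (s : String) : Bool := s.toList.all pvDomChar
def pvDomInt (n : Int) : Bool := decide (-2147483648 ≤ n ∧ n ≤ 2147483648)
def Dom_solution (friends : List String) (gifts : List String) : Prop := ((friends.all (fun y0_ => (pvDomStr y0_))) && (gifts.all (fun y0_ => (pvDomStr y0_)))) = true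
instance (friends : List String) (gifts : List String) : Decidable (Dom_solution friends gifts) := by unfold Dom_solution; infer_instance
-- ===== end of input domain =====

-- B replaces A's N×N matrix double scan by one sort of the net scores (base wins = rank
-- among distinct scores) plus sparse corrections only for pairs whose direct counts differ.

-- ===== PORT A =====
-- helper: graph[i][j] = f(graph[i][j]) written out (row read, entry update, row write)
def pvSet2 (m : List (List Int)) (i j : Int) (f : Int → Int) : List (List Int) :=
  PySem.List.pySetD m i
    (PySem.List.pySetD (PySem.List.pyGetD m i []) j
      (f (PySem.List.pyGetD (PySem.List.pyGetD m i []) j 0)))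

-- body of A's gifts loop (giver/receiver unpack; KeyError / unpack ValueError excluded by Pre_)
def pvGiftStepA (chk : PySem.Dict String Int) (st : List (List Int) × List (List Int))
    (g : String) : List (List Int) × List (List Int) :=
  match PySem.Str.split₀ g with
  | [giver, receiver] =>
    (pvSet2 st.1 (chk.getD giver 0) (chk.getD receiver 0) (· + 1),
     pvSet2 (pvSet2 st.2 (chk.getD giver 0) 0 (· + 1)) (chk.getD receiver 0) 1 (· + 1))
  | _ => st

-- body of A's third loop: gift_indi[i][2] = gift_indi[i][0] - gift_indi[i][1]
def pvDiffStepA (g : List (List Int)) (i : Int) : List (List Int) :=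
  pvSet2 g i 2 (fun _ =>
    PySem.List.pyGetD (PySem.List.pyGetD g i []) 0 0 -
    PySem.List.pyGetD (PySem.List.pyGetD g i []) 1 0)

-- body of A's inner counting loop over j
def pvCntStepA (graph gift_indi : List (List Int)) (i : Int) (cnt : Int) (j : Int) : Int :=
  if i = j then cnt
  else if PySem.List.pyGetD (PySem.List.pyGetD graph i []) j 0 >
          PySem.List.pyGetD (PySem.List.pyGetD graph j []) i 0 then cnt + 1
  else if PySem.List.pyGetD (PySem.List.pyGetD graph i []) j 0 =
          PySem.List.pyGetD (PySem.List.pyGetD graph j []) i 0 then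
    if PySem.List.pyGetD (PySem.List.pyGetD gift_indi i []) 2 0 >
       PySem.List.pyGetD (PySem.List.pyGetD gift_indi j []) 2 0 then cnt + 1 else cnt
  else cnt

def solution (friends : List String) (gifts : List String) : Int :=
  let n : Int := (friends.length : Int)
  let graph : List (List Int) :=
    (PySem.List.pyRange 0 n 1).map (fun _ => (PySem.List.pyRange 0 n 1).map (fun _ => (0:Int)))
  let gift_indi : List (List Int) := (PySem.List.pyRange 0 n 1).map (fun _ => [0, 0, 0])
  let chk : PySem.Dict String Int :=
    (PySem.List.pyRange 0 n 1).foldl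
      (fun d i => d.insert (PySem.List.pyGetD friends i "") i) PySem.Dict.empty
  let st :=
    (PySem.List.pyRange 0 (gifts.length : Int) 1).foldl
      (fun st i => pvGiftStepA chk st (PySem.List.pyGetD gifts i ""))
      (graph, gift_indi)
  let graph := st.1
  let gift_indi := (PySem.List.pyRange 0 (st.2.length : Int) 1).foldl pvDiffStepA st.2
  let result : List Int := (PySem.List.pyRange 0 n 1).map (fun _ => (0:Int))
  let result :=
    (PySem.List.pyRange 0 (graph.length : Int) 1).foldl
      (fun res i =>
        PySem.List.pySetD res i
          ((PySem.List.pyRange 0 (graph.length : Int) 1).foldl (pvCntStepA graph gift_indi i) 0))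
      result
  (PySem.List.max? result (fun x => x)).getD 0   -- max([]) ValueError excluded by Pre_

-- ===== PORT B =====
-- body of B's gifts loop (KeyError / unpack ValueError excluded by Pre_):
-- score[i] += 1; score[j] -= 1; cnt[(i,j)] = cnt.get((i,j),0)+1
def pvGiftStepB (idx : PySem.Dict String Int)
    (st : List Int × PySem.Dict (Int × Int) Int) (g : String) :
    List Int × PySem.Dict (Int × Int) Int :=
  match PySem.Str.split₀ g with
  | [a, b] =>
    let i := idx.getD a 0
    let j := idx.getD b 0
    let sc := PySem.List.pySetD st.1 i (PySem.List.pyGetD st.1 i 0 + 1)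
    let sc := PySem.List.pySetD sc j (PySem.List.pyGetD sc j 0 - 1)
    (sc, st.2.insert (i, j) (st.2.getD (i, j) 0 + 1))
  | _ => st

-- body of B's correction loop over the keys of cnt (one unordered pair, done-set dedup)
def pvAdjStepB (cnt : PySem.Dict (Int × Int) Int) (score : List Int)
    (st : List Int × PySem.Set (Int × Int)) (p : Int × Int) :
    List Int × PySem.Set (Int × Int) :=
  if p.1 = p.2 then st
  else
    let q := if p.1 < p.2 then p else (p.2, p.1)
    if PySem.Set.contains st.2 q then st
    else
      let done := PySem.Set.add st.2 q
      let cij := cnt.getD q 0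
      let cji := cnt.getD (q.2, q.1) 0
      if cij ≠ cji then
        let w :=
          if PySem.List.pyGetD score q.1 0 > PySem.List.pyGetD score q.2 0 then
            PySem.List.pySetD st.1 q.1 (PySem.List.pyGetD st.1 q.1 0 - 1)
          else if PySem.List.pyGetD score q.2 0 > PySem.List.pyGetD score q.1 0 then
            PySem.List.pySetD st.1 q.2 (PySem.List.pyGetD st.1 q.2 0 - 1)
          else st.1
        let k := if cij > cji then q.1 else q.2
        (PySem.List.pySetD w k (PySem.List.pyGetD w k 0 + 1), done)
      else (st.1, done)

def solution_alt (friends : List String) (gifts : List String) : Int :=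
  let n := friends.length
  let idx : PySem.Dict String Int :=
    (PySem.List.enumerate friends).foldl (fun d p => d.insert p.2 p.1) PySem.Dict.empty
  let st := gifts.foldl (pvGiftStepB idx) (List.replicate n (0:Int), PySem.Dict.empty)
  let score := st.1
  let cnt := st.2
  let ss := PySem.List.sorted score (fun x => x) false
  let first : PySem.Dict Int Int :=
    (PySem.List.pyRange ((n : Int) - 1) (-1) (-1)).foldl
      (fun d r => d.insert (PySem.List.pyGetD ss r 0) r) PySem.Dict.empty
  let wins := score.map (fun s => first.getD s 0)   -- first[s]: key always present (ss is a permutation of score)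
  let res := cnt.keys.foldl (pvAdjStepB cnt score) (wins, PySem.Set.empty)
  (PySem.List.max? res.1 (fun x => x)).getD 0      -- max([]) ValueError excluded by Pre_

-- ===== PRECONDITION & SPEC =====
-- Pre_ excludes exactly the inputs where the Python A raises: empty friends (ValueError on
-- max([])), a gift that does not split into exactly two words (unpacking ValueError), and a
-- gift naming someone not in friends (KeyError).
def Pre_solution (friends : List String) (gifts : List String) : Prop :=
  friends ≠ [] ∧ ∀ g ∈ gifts,
    (PySem.Str.split₀ g).length = 2 ∧ ∀ t ∈ PySem.Str.split₀ g, t ∈ friends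
instance (friends : List String) (gifts : List String) : Decidable (Pre_solution friends gifts) := by
  unfold Pre_solution; infer_instance

def pvWitness_solution : List String × List String :=
  (["muzi", "ryan"], ["muzi ryan", "ryan muzi", "muzi ryan"])

def Spec_solution (friends : List String) (gifts : List String) (out : Int) : Prop := out = solution_alt friends gifts
instance (friends : List String) (gifts : List String) (out : Int) : Decidable (Spec_solution friends gifts out) := by unfold Spec_solution; infer_instance

-- ===== CLAIM (what is proved, stated in full; the proofs are below) =====
def Claim_equal_solution : Prop := ∀ (friends : List String) (gifts : List String), Dom_solution friends gifts → Pre_solution friends gifts → Spec_solution friends gifts (solution friends gifts)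

-- ===== LEMMAS AND PROOFS =====

def pvVec {α : Type} (n : Int) (f : Int → α) : List α := (PySem.List.pyRange 0 n 1).map f

lemma pvVec_get {α : Type} (n i : Int) (f : Int → α) (d : α) (h0 : 0 ≤ i) (h : i < n) :
    PySem.List.pyGetD (pvVec n f) i d = f i :=
  PySem.List.pyGetD_map_pyRange_of_nonneg f n i d h0 h

lemma pvVec_set {α : Type} (n i : Int) (f : Int → α) (v : α) (h0 : 0 ≤ i) (h : i < n) :
    PySem.List.pySetD (pvVec n f) i v = pvVec n (fun k => if k = i then v else f k) := by
  rw [PySem.List.pySetD_of_nonneg _ v h0]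
  unfold pvVec
  apply List.ext_getElem
  · simp [PySem.List.length_pyRange_one]
  · intro m h1 h2
    simp only [List.getElem_set, List.getElem_map, PySem.List.getElem_pyRange_one]
    by_cases hc : m = i.toNat
    · have h3 : ((0:Int) + (m:Int)) = i := by omega
      have h4 : ¬ (i < 0) := by omega
      simp [hc, h3, h4]
    · have h3 : ¬ ((0:Int) + (m:Int) = i) := by omega
      have h4 : ¬ (i.toNat = m) := by omega
      simp only [if_neg h3, if_neg h4]

lemma pvVec_congr {α : Type} (n : Int) (f g : Int → α) (h : ∀ k, 0 ≤ k → k < n → f k = g k) :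
    pvVec n f = pvVec n g := by
  unfold pvVec
  apply List.map_congr_left
  intro x hx
  rw [PySem.List.mem_pyRange_one] at hx
  exact h x hx.1 hx.2

lemma pvVec_len {α : Type} (n : Int) (f : Int → α) (h : 0 ≤ n) :
    ((pvVec n f).length : Int) = n := by
  simp [pvVec, PySem.List.length_pyRange_one]
  omega

lemma replicate_pvVec {α : Type} (m : Nat) (c : α) :
    List.replicate m c = pvVec (m : Int) (fun _ => c) := by
  apply List.ext_getElem <;> simp [pvVec, PySem.List.length_pyRange_one]

def pvIdx (friends : List String) : PySem.Dict String Int :=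
  (PySem.List.pyRange 0 (friends.length : Int) 1).foldl
    (fun d i => d.insert (PySem.List.pyGetD friends i "") i) PySem.Dict.empty

lemma pvIdx_bounds (friends : List String) (h : friends ≠ []) (s : String) :
    0 ≤ (pvIdx friends).getD s 0 ∧ (pvIdx friends).getD s 0 < (friends.length : Int) := by
  have hn : 0 < (friends.length : Int) := by
    have := List.length_pos_iff.mpr h
    omega
  have key : ∀ (l : List Int) (d : PySem.Dict String Int),
      (∀ t, 0 ≤ d.getD t 0 ∧ d.getD t 0 < (friends.length : Int)) →
      (∀ i ∈ l, 0 ≤ i ∧ i < (friends.length : Int)) →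
      ∀ t, 0 ≤ (l.foldl (fun d i => d.insert (PySem.List.pyGetD friends i "") i) d).getD t 0 ∧
           (l.foldl (fun d i => d.insert (PySem.List.pyGetD friends i "") i) d).getD t 0 < (friends.length : Int) := by
    intro l
    induction l with
    | nil => intro d hd _ t; exact hd t
    | cons a l ih =>
      intro d hd hl t
      simp only [List.foldl_cons]
      apply ih
      · intro t'
        rw [PySem.Dict.getD_insert]
        split
        · exact hl a (by simp)
        · exact hd t'
      · intro i hi; exact hl i (by simp [hi])
  unfold pvIdx
  apply key
  · intro t
    constructor <;> simp [PySem.Dict.getD, PySem.Dict.get?, PySem.Dict.empty] <;> omega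
  · intro i hi
    rw [PySem.List.mem_pyRange_one] at hi
    exact hi

def pvPairOf (friends : List String) (g : String) : Option (Int × Int) :=
  match PySem.Str.split₀ g with
  | [a, b] => some ((pvIdx friends).getD a 0, (pvIdx friends).getD b 0)
  | _ => none

def pvPairs (friends gifts : List String) : List (Int × Int) := gifts.filterMap (pvPairOf friends)

def pvC (friends gifts : List String) (i j : Int) : Int := ((pvPairs friends gifts).count (i, j) : Int)

def pvGive (friends gifts : List String) (i : Int) : Int :=
  (((pvPairs friends gifts).countP (fun p => p.1 == i)) : Int)

def pvRecv (friends gifts : List String) (i : Int) : Int :=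
  (((pvPairs friends gifts).countP (fun p => p.2 == i)) : Int)

def pvS (friends gifts : List String) (i : Int) : Int :=
  pvGive friends gifts i - pvRecv friends gifts i

lemma pvPairs_bounds (fr gi : List String) (h : fr ≠ []) :
    ∀ p ∈ pvPairs fr gi, 0 ≤ p.1 ∧ p.1 < (fr.length : Int) ∧ 0 ≤ p.2 ∧ p.2 < (fr.length : Int) := by
  intro p hp
  obtain ⟨g, _, hg⟩ := List.mem_filterMap.mp hp
  unfold pvPairOf at hg
  cases hv : PySem.Str.split₀ g with
  | nil => rw [hv] at hg; cases hg
  | cons a t => cases t with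
    | nil => rw [hv] at hg; cases hg
    | cons b t2 => cases t2 with
      | nil =>
        rw [hv] at hg
        cases hg
        obtain ⟨h1, h2⟩ := pvIdx_bounds fr h a
        obtain ⟨h3, h4⟩ := pvIdx_bounds fr h b
        exact ⟨h1, h2, h3, h4⟩
      | cons c t3 => rw [hv] at hg; cases hg

lemma pvRow3_get0 (x y z : Int) : PySem.List.pyGetD [x, y, z] (0:Int) 0 = x := rfl
lemma pvRow3_get1 (x y z : Int) : PySem.List.pyGetD [x, y, z] (1:Int) 0 = y := rfl
lemma pvRow3_get2 (x y z : Int) : PySem.List.pyGetD [x, y, z] (2:Int) 0 = z := rfl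
lemma pvRow3_set0 (x y z v : Int) : PySem.List.pySetD [x, y, z] (0:Int) v = [v, y, z] := rfl
lemma pvRow3_set1 (x y z v : Int) : PySem.List.pySetD [x, y, z] (1:Int) v = [x, v, z] := rfl
lemma pvRow3_set2 (x y z v : Int) : PySem.List.pySetD [x, y, z] (2:Int) v = [x, y, v] := rfl

lemma pvSet2_vec (n i j : Int) (R : Int → List Int) (u : Int → Int) (h0 : 0 ≤ i) (h : i < n) :
    pvSet2 (pvVec n R) i j u
      = pvVec n (fun a => if a = i then
          PySem.List.pySetD (R i) j (u (PySem.List.pyGetD (R i) j 0)) else R a) := by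
  unfold pvSet2
  rw [pvVec_get n i R [] h0 h, pvVec_set n i R _ h0 h]

lemma pvSet2_mat (n i j : Int) (f : Int → Int → Int) (u : Int → Int)
    (hi0 : 0 ≤ i) (hi : i < n) (hj0 : 0 ≤ j) (hj : j < n) :
    pvSet2 (pvVec n (fun a => pvVec n (f a))) i j u
      = pvVec n (fun a => pvVec n (fun b => if a = i ∧ b = j then u (f i j) else f a b)) := by
  rw [pvSet2_vec n i j _ u hi0 hi]
  apply pvVec_congr
  intro a _ _
  by_cases ha : a = i
  · subst ha
    rw [if_pos rfl, pvVec_get n j (f a) 0 hj0 hj, pvVec_set n j (f a) _ hj0 hj]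
    apply pvVec_congr
    intro b _ _
    by_cases hb : b = j
    · subst hb; simp
    · simp [hb]
  · rw [if_neg ha]
    apply pvVec_congr
    intro b _ _
    have : ¬ (a = i ∧ b = j) := fun hc => ha hc.1
    rw [if_neg this]

lemma pvIfTrue {α : Type} [Decidable (true = true)] (a b : α) : (if true = true then a else b) = a := by simp
lemma pvIfFalse {α : Type} [Decidable (false = true)] (a b : α) : (if false = true then a else b) = b := by simp

lemma A_fold (fr : List String) (h : fr ≠ []) :
    ∀ (gs : List String) (f : Int → Int → Int) (ga gb : Int → Int),
      gs.foldl (pvGiftStepA (pvIdx fr))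
        (pvVec (fr.length : Int) (fun a => pvVec (fr.length : Int) (f a)),
         pvVec (fr.length : Int) (fun a => [ga a, gb a, (0:Int)]))
      = (pvVec (fr.length : Int) (fun a => pvVec (fr.length : Int)
            (fun b => f a b + ((gs.filterMap (pvPairOf fr)).count (a, b) : Int))),
         pvVec (fr.length : Int) (fun a =>
           [ga a + ((gs.filterMap (pvPairOf fr)).countP (fun p => p.1 == a) : Int),
            gb a + ((gs.filterMap (pvPairOf fr)).countP (fun p => p.2 == a) : Int), (0:Int)])) := by
  intro gs
  induction gs with
  | nil => intro f ga gb; simp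
  | cons g gs ih =>
    intro f ga gb
    simp only [List.foldl_cons, List.filterMap_cons]
    by_cases hsp : ∃ a b, PySem.Str.split₀ g = [a, b]
    · obtain ⟨a, b, hab⟩ := hsp
      have hpo : pvPairOf fr g = some ((pvIdx fr).getD a 0, (pvIdx fr).getD b 0) := by
        simp [pvPairOf, hab]
      have hstep : pvGiftStepA (pvIdx fr)
          (pvVec (fr.length : Int) (fun a => pvVec (fr.length : Int) (f a)),
           pvVec (fr.length : Int) (fun a => [ga a, gb a, (0:Int)])) g
          = (pvVec (fr.length : Int) (fun x => pvVec (fr.length : Int)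
                (fun y => if x = (pvIdx fr).getD a 0 ∧ y = (pvIdx fr).getD b 0
                          then f x y + 1 else f x y)),
             pvVec (fr.length : Int) (fun x =>
               [(if x = (pvIdx fr).getD a 0 then ga x + 1 else ga x),
                (if x = (pvIdx fr).getD b 0 then gb x + 1 else gb x), (0:Int)])) := by
        obtain ⟨hga0, hga⟩ := pvIdx_bounds fr h a
        obtain ⟨hgb0, hgb⟩ := pvIdx_bounds fr h b
        simp only [pvGiftStepA, hab]
        refine congrArg₂ Prod.mk ?_ ?_
        · rw [pvSet2_mat _ _ _ _ _ hga0 hga hgb0 hgb]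
          apply pvVec_congr; intro x _ _
          apply pvVec_congr; intro y _ _
          by_cases hc : x = (pvIdx fr).getD a 0 ∧ y = (pvIdx fr).getD b 0
          · rw [if_pos hc, if_pos hc, hc.1, hc.2]
          · rw [if_neg hc, if_neg hc]
        · rw [pvSet2_vec _ _ _ _ _ hga0 hga]
          have hmid : pvVec (fr.length : Int) (fun x => if x = (pvIdx fr).getD a 0 then
                PySem.List.pySetD [ga ((pvIdx fr).getD a 0), gb ((pvIdx fr).getD a 0), 0] 0
                  ((fun t => t + 1) (PySem.List.pyGetD [ga ((pvIdx fr).getD a 0), gb ((pvIdx fr).getD a 0), 0] 0 0))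
                else [ga x, gb x, 0])
              = pvVec (fr.length : Int)
                  (fun x => [(if x = (pvIdx fr).getD a 0 then ga x + 1 else ga x), gb x, (0:Int)]) := by
            apply pvVec_congr; intro x _ _
            by_cases hc : x = (pvIdx fr).getD a 0
            · rw [if_pos hc, if_pos hc, pvRow3_get0, pvRow3_set0, hc]
            · rw [if_neg hc, if_neg hc]
          rw [hmid, pvSet2_vec _ _ _ _ _ hgb0 hgb]
          apply pvVec_congr; intro x _ _
          by_cases hc : x = (pvIdx fr).getD b 0
          · rw [if_pos hc, if_pos hc, pvRow3_get1, pvRow3_set1, hc]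
          · rw [if_neg hc, if_neg hc]
      rw [hstep, hpo]
      rw [ih]
      refine congrArg₂ Prod.mk ?_ ?_
      · apply pvVec_congr; intro x _ _
        apply pvVec_congr; intro y _ _
        by_cases hc : x = (pvIdx fr).getD a 0 ∧ y = (pvIdx fr).getD b 0
        · rw [if_pos hc]
          have hb1 : (((pvIdx fr).getD a 0, (pvIdx fr).getD b 0) == (x, y)) = true := by
            simp [hc.1, hc.2]
          simp only [List.count_cons, hb1, pvIfTrue, pvIfFalse]
          push_cast; ring
        · rw [if_neg hc]
          have hb1 : (((pvIdx fr).getD a 0, (pvIdx fr).getD b 0) == (x, y)) = false := by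
            exact beq_eq_false_iff_ne.mpr
              (fun hh => hc ⟨((Prod.mk.injEq _ _ _ _).mp hh).1.symm, ((Prod.mk.injEq _ _ _ _).mp hh).2.symm⟩)
          simp only [List.count_cons, hb1, pvIfTrue, pvIfFalse]
          push_cast; ring
      · apply pvVec_congr; intro x _ _
        refine congrArg₂ (fun u v => [u, v, (0:Int)]) ?_ ?_
        · rw [List.countP_cons]
          by_cases hc : x = (pvIdx fr).getD a 0
          · have hb1 : (((pvIdx fr).getD a 0 : Int) == x) = true := by simp [hc]
            simp only [if_pos hc, hb1, pvIfTrue, pvIfFalse]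
            push_cast; ring
          · have hb1 : (((pvIdx fr).getD a 0 : Int) == x) = false := by
              exact beq_eq_false_iff_ne.mpr (fun hh => hc hh.symm)
            simp only [if_neg hc, hb1, pvIfTrue, pvIfFalse]
            push_cast; ring
        · rw [List.countP_cons]
          by_cases hc : x = (pvIdx fr).getD b 0
          · have hb1 : (((pvIdx fr).getD b 0 : Int) == x) = true := by simp [hc]
            simp only [if_pos hc, hb1, pvIfTrue, pvIfFalse]
            push_cast; ring
          · have hb1 : (((pvIdx fr).getD b 0 : Int) == x) = false := by
              exact beq_eq_false_iff_ne.mpr (fun hh => hc hh.symm)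
            simp only [if_neg hc, hb1, pvIfTrue, pvIfFalse]
            push_cast; ring
    · have hpo : pvPairOf fr g = none := by
        unfold pvPairOf
        cases hv : PySem.Str.split₀ g with
        | nil => rfl
        | cons a t => cases t with
          | nil => rfl
          | cons b t2 => cases t2 with
            | nil => exact absurd ⟨a, b, hv⟩ hsp
            | cons c t3 => rfl
      have hstep : pvGiftStepA (pvIdx fr)
          (pvVec (fr.length : Int) (fun a => pvVec (fr.length : Int) (f a)),
           pvVec (fr.length : Int) (fun a => [ga a, gb a, (0:Int)])) g
          = (pvVec (fr.length : Int) (fun a => pvVec (fr.length : Int) (f a)),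
             pvVec (fr.length : Int) (fun a => [ga a, gb a, (0:Int)])) := by
        unfold pvGiftStepA
        cases hv : PySem.Str.split₀ g with
        | nil => rfl
        | cons a t => cases t with
          | nil => rfl
          | cons b t2 => cases t2 with
            | nil => exact absurd ⟨a, b, hv⟩ hsp
            | cons c t3 => rfl
      rw [hstep, hpo, ih]

lemma diff_loop (n : Int) (ga gb : Int → Int) :
    ∀ (m : Nat), (m : Int) ≤ n →
      (PySem.List.pyRange 0 (m : Int) 1).foldl pvDiffStepA
          (pvVec n (fun a => [ga a, gb a, (0:Int)]))
        = pvVec n (fun a => [ga a, gb a, if 0 ≤ a ∧ a < (m : Int) then ga a - gb a else 0]) := by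
  intro m
  induction m with
  | zero =>
    intro _
    rw [PySem.List.pyRange_one_eq_nil (by norm_num)]
    simp only [List.foldl_nil]
    apply pvVec_congr; intro a _ _
    have hc : ¬ (0 ≤ a ∧ a < (((0:Nat)) : Int)) := by push_cast; omega
    rw [if_neg hc]
  | succ m ih =>
    intro hm
    have hm' : (m : Int) ≤ n := by push_cast at hm ⊢; omega
    have hcast : ((m + 1 : Nat) : Int) = (m : Int) + 1 := by push_cast; ring
    rw [hcast, PySem.List.pyRange_one_succ_right (by positivity), List.foldl_append,
        ih hm']
    simp only [List.foldl_cons, List.foldl_nil]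
    unfold pvDiffStepA
    have h0 : (0:Int) ≤ (m:Int) := by positivity
    have hmn : (m:Int) < n := by omega
    rw [pvSet2_vec n (m:Int) 2 _ _ h0 hmn]
    have hrow : ¬ (0 ≤ (m:Int) ∧ (m:Int) < (m:Int)) := by omega
    rw [pvVec_get n (m:Int) _ [] h0 hmn, if_neg hrow, pvRow3_get0, pvRow3_get1, pvRow3_set2]
    apply pvVec_congr; intro a _ _
    by_cases hc : a = (m:Int)
    · subst hc
      rw [if_pos rfl, if_pos (by omega)]
    · rw [if_neg hc]
      by_cases hc2 : 0 ≤ a ∧ a < (m:Int)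
      · rw [if_pos hc2, if_pos (by omega)]
      · rw [if_neg hc2, if_neg (by omega)]

lemma setD_loop (n : Int) (v : Int → Int) :
    ∀ (m : Nat), (m : Int) ≤ n → ∀ (f : Int → Int),
      (PySem.List.pyRange 0 (m : Int) 1).foldl (fun r i => PySem.List.pySetD r i (v i)) (pvVec n f)
        = pvVec n (fun k => if 0 ≤ k ∧ k < (m : Int) then v k else f k) := by
  intro m
  induction m with
  | zero =>
    intro _ f
    rw [PySem.List.pyRange_one_eq_nil (by norm_num)]
    simp only [List.foldl_nil]
    apply pvVec_congr; intro a _ _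
    have hc : ¬ (0 ≤ a ∧ a < (((0:Nat)) : Int)) := by push_cast; omega
    rw [if_neg hc]
  | succ m ih =>
    intro hm f
    have hm' : (m : Int) ≤ n := by push_cast at hm ⊢; omega
    have hcast : ((m + 1 : Nat) : Int) = (m : Int) + 1 := by push_cast; ring
    rw [hcast, PySem.List.pyRange_one_succ_right (by positivity), List.foldl_append, ih hm' f]
    simp only [List.foldl_cons, List.foldl_nil]
    rw [pvVec_set n (m:Int) _ _ (by positivity) (by omega)]
    apply pvVec_congr; intro a _ _
    by_cases hc : a = (m:Int)
    · subst hc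
      rw [if_pos rfl, if_pos (by omega)]
    · rw [if_neg hc]
      by_cases hc2 : 0 ≤ a ∧ a < (m:Int)
      · rw [if_pos hc2, if_pos (by omega)]
      · rw [if_neg hc2, if_neg (by omega)]

def pvBeatsB (C : Int → Int → Int) (S : Int → Int) (k j : Int) : Bool :=
  decide (C k j > C j k) || (decide (C k j = C j k) && decide (S k > S j))

def pvResA (fr gi : List String) (k : Int) : Int :=
  (((PySem.List.pyRange 0 (fr.length : Int) 1).countP
      (fun j => !decide (k = j) && pvBeatsB (pvC fr gi) (pvS fr gi) k j)) : Int)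

lemma pvIdx_eq (fr : List String) :
    (PySem.List.pyRange 0 (fr.length : Int) 1).foldl
      (fun d i => d.insert (PySem.List.pyGetD fr i "") i) PySem.Dict.empty = pvIdx fr := rfl

lemma pvVec_def {α : Type} (n : Int) (f : Int → α) :
    (PySem.List.pyRange 0 n 1).map f = pvVec n f := rfl

lemma cnt_inner (fr gi : List String) (i : Int) (hi0 : 0 ≤ i) (hin : i < (fr.length : Int)) :
    (PySem.List.pyRange 0 (fr.length : Int) 1).foldl
      (pvCntStepA
        (pvVec (fr.length : Int) (fun a => pvVec (fr.length : Int) (fun b => pvC fr gi a b)))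
        (pvVec (fr.length : Int) (fun a => [pvGive fr gi a, pvRecv fr gi a, pvS fr gi a])) i)
      0
    = pvResA fr gi i := by
  rw [PySem.List.foldl_congr_mem _ _
      (fun cnt j => if (!decide (i = j) && pvBeatsB (pvC fr gi) (pvS fr gi) i j) then cnt + 1 else cnt) 0 ?_]
  · rw [PySem.List.foldl_if_add_one]
    unfold pvResA
    ring
  · intro cnt j hj
    rw [PySem.List.mem_pyRange_one] at hj
    beta_reduce
    unfold pvCntStepA
    rw [pvVec_get _ _ _ _ hi0 hin, pvVec_get _ _ _ _ hj.1 hj.2,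
        pvVec_get _ _ _ _ hi0 hin, pvVec_get _ _ _ _ hj.1 hj.2,
        pvVec_get _ _ _ _ hi0 hin, pvVec_get _ _ _ _ hj.1 hj.2,
        pvRow3_get2, pvRow3_get2]
    by_cases hij : i = j
    · rw [if_pos hij]
      have : (!decide (i = j) && pvBeatsB (pvC fr gi) (pvS fr gi) i j) = false := by
        simp [hij]
      simp only [this, pvIfFalse]
    · rw [if_neg hij]
      unfold pvBeatsB
      split_ifs with h1 h2 h3 <;> simp_all <;> omega

lemma solA (fr gi : List String) (h : fr ≠ []) :
    solution fr gi
      = (PySem.List.max? (pvVec (fr.length : Int) (pvResA fr gi)) (fun x => x)).getD 0 := by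
  have hn0 : 0 < (fr.length : Int) := by
    have := List.length_pos_iff.mpr h; omega
  simp only [solution, pvIdx_eq, pvVec_def]
  rw [PySem.List.foldl_pyRange_zero_pyGetD' gi "" (pvGiftStepA (pvIdx fr))]
  rw [A_fold fr h gi]
  have hmat : (pvVec (fr.length:Int) fun a => pvVec (fr.length:Int) fun b =>
      0 + (↑(List.count (a, b) (List.filterMap (pvPairOf fr) gi)) : Int))
      = pvVec (fr.length:Int) (fun a => pvVec (fr.length:Int) (fun b => pvC fr gi a b)) := by
    apply pvVec_congr; intro a _ _
    apply pvVec_congr; intro b _ _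
    simp [pvC, pvPairs]
  have hindi : (pvVec (fr.length:Int) fun a =>
      [0 + (↑(List.countP (fun p => p.1 == a) (List.filterMap (pvPairOf fr) gi)) : Int),
       0 + (↑(List.countP (fun p => p.2 == a) (List.filterMap (pvPairOf fr) gi)) : Int), (0:Int)])
      = pvVec (fr.length:Int) (fun a => [pvGive fr gi a, pvRecv fr gi a, (0:Int)]) := by
    apply pvVec_congr; intro a _ _
    simp [pvGive, pvRecv, pvPairs]
  simp only [hmat, hindi]
  have hlen : ∀ (f : Int → List Int), (((pvVec (fr.length:Int) f).length : Nat) : Int) = (fr.length : Int) :=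
    fun f => pvVec_len _ _ (le_of_lt hn0)
  simp only [hlen]
  rw [diff_loop (fr.length : Int) _ _ fr.length (by omega)]
  have hindi2 : (pvVec (fr.length:Int) (fun a => [pvGive fr gi a, pvRecv fr gi a,
      if 0 ≤ a ∧ a < ((fr.length : Nat) : Int) then pvGive fr gi a - pvRecv fr gi a else 0]))
      = pvVec (fr.length:Int) (fun a => [pvGive fr gi a, pvRecv fr gi a, pvS fr gi a]) := by
    apply pvVec_congr; intro a h1 h2
    rw [if_pos ⟨h1, h2⟩, pvS]
  rw [hindi2]
  rw [setD_loop (fr.length : Int) _ fr.length (by omega)]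
  have hres : pvVec (fr.length:Int) (fun k => if 0 ≤ k ∧ k < ((fr.length : Nat) : Int) then
      (PySem.List.pyRange 0 (fr.length:Int) 1).foldl
        (pvCntStepA
          (pvVec (fr.length:Int) (fun a => pvVec (fr.length:Int) (fun b => pvC fr gi a b)))
          (pvVec (fr.length:Int) (fun a => [pvGive fr gi a, pvRecv fr gi a, pvS fr gi a])) k) 0
      else 0)
      = pvVec (fr.length:Int) (pvResA fr gi) := by
    apply pvVec_congr; intro k h1 h2
    rw [if_pos ⟨h1, h2⟩, cnt_inner fr gi k h1 h2]
  rw [hres]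

-- ===== B-side proofs =====

lemma dict_empty_getD (q : Int × Int) :
    (PySem.Dict.empty (κ := Int × Int) (ν := Int)).getD q 0 = 0 := by
  simp [PySem.Dict.getD, PySem.Dict.get?, PySem.Dict.empty]

lemma keys_insert_add {κ ν : Type} [BEq κ] [LawfulBEq κ] (d : PySem.Dict κ ν) (k : κ) (v : ν) :
    (d.insert k v).keys = PySem.Set.add d.keys k := by
  cases hc : d.contains k with
  | true =>
    rw [PySem.Dict.keys_insert_of_contains d v hc,
        PySem.Set.add_of_mem ((PySem.Dict.contains_iff_mem_keys d k).mp hc)]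
  | false =>
    rw [PySem.Dict.keys_insert_of_not_contains d v hc,
        PySem.Set.add_of_not_mem (fun hm => by
          rw [(PySem.Dict.contains_iff_mem_keys d k).mpr hm] at hc; cases hc)]

-- B's gifts loop: score vector, pair counter and its key set, characterised at once
lemma B_fold (fr : List String) (h : fr ≠ []) :
    ∀ (gs : List String) (sf : Int → Int) (d : PySem.Dict (Int × Int) Int),
      (gs.foldl (pvGiftStepB (pvIdx fr)) (pvVec (fr.length : Int) sf, d)).1
          = pvVec (fr.length : Int) (fun k => sf k
              + ((gs.filterMap (pvPairOf fr)).countP (fun p => p.1 == k) : Int)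
              - ((gs.filterMap (pvPairOf fr)).countP (fun p => p.2 == k) : Int))
      ∧ (∀ q, (gs.foldl (pvGiftStepB (pvIdx fr)) (pvVec (fr.length : Int) sf, d)).2.getD q 0
          = d.getD q 0 + ((gs.filterMap (pvPairOf fr)).count q : Int))
      ∧ (gs.foldl (pvGiftStepB (pvIdx fr)) (pvVec (fr.length : Int) sf, d)).2.keys
          = PySem.Set.update d.keys (gs.filterMap (pvPairOf fr)) := by
  intro gs
  induction gs with
  | nil =>
    intro sf d
    refine ⟨by simp, fun q => by simp, by simp [PySem.Set.update]⟩
  | cons g gs ih =>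
    intro sf d
    simp only [List.foldl_cons, List.filterMap_cons]
    by_cases hsp : ∃ a b, PySem.Str.split₀ g = [a, b]
    · obtain ⟨a, b, hab⟩ := hsp
      have hpo : pvPairOf fr g = some ((pvIdx fr).getD a 0, (pvIdx fr).getD b 0) := by
        simp [pvPairOf, hab]
      obtain ⟨hga0, hga⟩ := pvIdx_bounds fr h a
      obtain ⟨hgb0, hgb⟩ := pvIdx_bounds fr h b
      have hstep : pvGiftStepB (pvIdx fr) (pvVec (fr.length : Int) sf, d) g
          = (pvVec (fr.length : Int) (fun k =>
               sf k + (if k = (pvIdx fr).getD a 0 then 1 else 0)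
                    - (if k = (pvIdx fr).getD b 0 then 1 else 0)),
             d.insert ((pvIdx fr).getD a 0, (pvIdx fr).getD b 0)
               (d.getD ((pvIdx fr).getD a 0, (pvIdx fr).getD b 0) 0 + 1)) := by
        simp only [pvGiftStepB, hab]
        refine congrArg₂ Prod.mk ?_ rfl
        rw [pvVec_get _ _ _ _ hga0 hga, pvVec_set _ _ _ _ hga0 hga,
            pvVec_get _ _ _ _ hgb0 hgb, pvVec_set _ _ _ _ hgb0 hgb]
        apply pvVec_congr
        intro k _ _
        split_ifs <;> subst_vars <;> simp_all <;> omega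
      rw [hstep, hpo]
      obtain ⟨ih1, ih2, ih3⟩ := ih
            (fun k => sf k + (if k = (pvIdx fr).getD a 0 then 1 else 0)
                           - (if k = (pvIdx fr).getD b 0 then 1 else 0))
            (d.insert ((pvIdx fr).getD a 0, (pvIdx fr).getD b 0)
               (d.getD ((pvIdx fr).getD a 0, (pvIdx fr).getD b 0) 0 + 1))
      refine ⟨?_, ?_, ?_⟩
      · rw [ih1]
        apply pvVec_congr
        intro k _ _
        rw [List.countP_cons, List.countP_cons]
        simp only [beq_iff_eq]
        split_ifs <;> subst_vars <;> push_cast <;> omega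
      · intro q
        rw [ih2, PySem.Dict.getD_insert, List.count_cons]
        simp only [beq_iff_eq]
        by_cases hq : q = ((pvIdx fr).getD a 0, (pvIdx fr).getD b 0)
        · subst hq
          rw [if_pos rfl, if_pos rfl]
          push_cast; ring
        · rw [if_neg hq, if_neg (fun hh => hq hh.symm)]
          push_cast; ring
      · rw [ih3, keys_insert_add, PySem.Set.update_cons]
    · have hpo : pvPairOf fr g = none := by
        unfold pvPairOf
        cases hv : PySem.Str.split₀ g with
        | nil => rfl
        | cons a t => cases t with
          | nil => rfl
          | cons b t2 => cases t2 with
            | nil => exact absurd ⟨a, b, hv⟩ hsp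
            | cons c t3 => rfl
      have hstep : pvGiftStepB (pvIdx fr) (pvVec (fr.length : Int) sf, d)  g
          = (pvVec (fr.length : Int) sf, d) := by
        unfold pvGiftStepB
        cases hv : PySem.Str.split₀ g with
        | nil => rfl
        | cons a t => cases t with
          | nil => rfl
          | cons b t2 => cases t2 with
            | nil => exact absurd ⟨a, b, hv⟩ hsp
            | cons c t3 => rfl
      rw [hstep, hpo]
      exact ih sf d

-- the reverse fill loop 'for r in range(t-1, -1, -1): first[ss[r]] = r'
lemma first_fold (ss : List Int) :
    ∀ (t : Nat), t ≤ ss.length → ∀ (d : PySem.Dict Int Int) (v : Int),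
      ((PySem.List.pyRange ((t : Int) - 1) (-1) (-1)).foldl
          (fun d r => d.insert (PySem.List.pyGetD ss r 0) r) d).get? v
        = if v ∈ ss.take t then some ((List.idxOf v (ss.take t) : Nat) : Int) else d.get? v := by
  intro t
  induction t with
  | zero =>
    intro _ d v
    rw [PySem.List.pyRange_neg_one_eq_nil (by norm_num)]
    simp
  | succ t ih =>
    intro ht d v
    have htl : t < ss.length := by omega
    have hcast : ((t + 1 : Nat) : Int) - 1 = (t : Int) := by push_cast; ring
    rw [hcast, PySem.List.pyRange_neg_one_cons (by omega)]
    simp only [List.foldl_cons]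
    have hget : PySem.List.pyGetD ss (t : Int) 0 = ss[t] := by
      simp [PySem.List.pyGetD_natCast, List.getD_eq_getElem?_getD, htl]
    rw [hget, ih (by omega) (d.insert ss[t] (t : Int)) v]
    have htake : ss.take (t + 1) = ss.take t ++ [ss[t]] := by
      rw [List.take_add_one]
      simp [List.getElem?_eq_getElem htl]
    rw [htake]
    by_cases hmem : v ∈ ss.take t
    · rw [if_pos hmem, if_pos (List.mem_append_left _ hmem)]
      rw [List.idxOf_append_of_mem hmem]
    · rw [if_neg hmem, PySem.Dict.get?_insert]
      by_cases hv : v = ss[t]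
      · rw [if_pos hv, if_pos (List.mem_append_right _ (by rw [hv]; exact List.mem_singleton_self _))]
        have hlen : (ss.take t).length = t := by simp [List.length_take]; omega
        rw [List.idxOf_append_of_notMem hmem, hlen, hv]
        simp [List.idxOf_cons]
      · rw [if_neg hv, if_neg (fun hmm => by
          rcases List.mem_append.mp hmm with h1 | h1
          · exact hmem h1
          · rw [List.mem_singleton] at h1; exact hv h1)]

lemma idxOf_sorted (l : List Int) (hp : l.Pairwise (· ≤ ·)) (v : Int) (hv : v ∈ l) :
    List.idxOf v l = l.countP (fun x => decide (x < v)) := by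
  set c := List.idxOf v l with hc
  have hcl : c < l.length := List.idxOf_lt_length_of_mem hv
  have hcv : l[c] = v := List.getElem_idxOf hcl
  have hpg := List.pairwise_iff_getElem.mp hp
  have hlt : ∀ r (hr : r < l.length), r < c → l[r] < v := by
    intro r hr hrc
    have h1 : l[r] ≤ l[c] := hpg r c hr hcl hrc
    have h2 : l[r] ≠ v := by
      have := List.not_of_lt_findIdx (p := (· == v)) (xs := l) (by exact hrc)
      simpa using this
    omega
  have hge : ∀ r (hr : r < l.length), c ≤ r → ¬ (l[r] < v) := by
    intro r hr hcr
    rcases Nat.eq_or_lt_of_le hcr with he | hlt2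
    · subst he; omega
    · have := hpg c r hcl hr hlt2
      omega
  have hsplit : l = l.take c ++ l.drop c := (List.take_append_drop c l).symm
  conv_rhs => rw [hsplit]
  rw [List.countP_append]
  have h1 : (l.take c).countP (fun x => decide (x < v)) = c := by
    have hlen : (l.take c).length = c := by simp [List.length_take]; omega
    have hall : (l.take c).countP (fun x => decide (x < v)) = (l.take c).length := by
      rw [List.countP_eq_length]
      intro a ha
      obtain ⟨r, hr, rfl⟩ := List.mem_iff_getElem.mp ha
      rw [List.getElem_take]
      simp only [decide_eq_true_eq]
      exact hlt r (by simp at hr; omega) (by simp [List.length_take] at hr; omega)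
    omega
  have h2 : (l.drop c).countP (fun x => decide (x < v)) = 0 := by
    rw [List.countP_eq_zero]
    intro a ha
    obtain ⟨r, hr, rfl⟩ := List.mem_iff_getElem.mp ha
    rw [List.getElem_drop]
    simp only [decide_eq_true_eq]
    exact hge (c + r) (by simp at hr; omega) (by omega)
  omega

-- the normalised unordered pair (i, j) i < j, none on the diagonal
def pvNorm (p : Int × Int) : Option (Int × Int) :=
  if p.1 = p.2 then none else if p.1 < p.2 then some p else some (p.2, p.1)

-- the per-friend effect of B's correction for one unordered pair q (q.1 < q.2)
def pvAdjK (C : Int → Int → Int) (S : Int → Int) (q : Int × Int) (k : Int) : Int :=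
  if C q.1 q.2 ≠ C q.2 q.1 then
    (if (if C q.1 q.2 > C q.2 q.1 then q.1 else q.2) = k then 1 else 0)
    - (if S q.1 > S q.2 then (if q.1 = k then 1 else 0)
       else if S q.2 > S q.1 then (if q.2 = k then 1 else 0) else 0)
  else 0

-- the pairs of l not yet in done, deduplicated, in order
def pvNew (done : PySem.Set (Int × Int)) (l : List (Int × Int)) : List (Int × Int) :=
  (PySem.Set.ofList l).filter (fun q => !(PySem.Set.contains done q))

lemma pvNew_cons_mem (done : PySem.Set (Int × Int)) (q : Int × Int) (l : List (Int × Int))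
    (hq : q ∈ done) : pvNew done (q :: l) = pvNew done l := by
  unfold pvNew
  rw [PySem.Set.ofList_cons, List.filter_cons]
  have hcq : PySem.Set.contains done q = true := by
    simp only [PySem.Set.contains, List.contains_iff_mem]
    exact hq
  rw [if_neg (by rw [hcq]; decide)]
  unfold PySem.Set.discard
  rw [List.filter_filter]
  apply List.filter_congr
  intro x _
  by_cases hx : x = q
  · subst hx
    rw [hcq]
    simp
  · simp [hx]

lemma pvNew_cons_not_mem (done : PySem.Set (Int × Int)) (q : Int × Int) (l : List (Int × Int))
    (hq : q ∉ done) : pvNew done (q :: l) = q :: pvNew (done ++ [q]) l := by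
  unfold pvNew
  rw [PySem.Set.ofList_cons, List.filter_cons]
  have hcq : PySem.Set.contains done q = false := by
    simp only [PySem.Set.contains]
    rw [← Bool.not_eq_true]
    intro hc
    exact hq (List.contains_iff_mem.mp hc)
  rw [if_pos (by rw [hcq]; decide)]
  congr 1
  unfold PySem.Set.discard
  rw [List.filter_filter]
  apply List.filter_congr
  intro x _
  by_cases hx : x = q
  · subst hx
    simp [PySem.Set.contains]
  · simp [PySem.Set.contains, hx]

lemma pvSetD_add1 (n i : Int) (f : Int → Int) (h0 : 0 ≤ i) (h : i < n) :
    PySem.List.pySetD (pvVec n f) i (PySem.List.pyGetD (pvVec n f) i 0 + 1)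
      = pvVec n (fun k => f k + if i = k then 1 else 0) := by
  rw [pvVec_get n i f 0 h0 h, pvVec_set n i f _ h0 h]
  apply pvVec_congr
  intro k _ _
  by_cases hc : k = i
  · subst hc; simp
  · rw [if_neg hc, if_neg (fun hh => hc hh.symm)]; ring

lemma pvSetD_sub1 (n i : Int) (f : Int → Int) (h0 : 0 ≤ i) (h : i < n) :
    PySem.List.pySetD (pvVec n f) i (PySem.List.pyGetD (pvVec n f) i 0 - 1)
      = pvVec n (fun k => f k - if i = k then 1 else 0) := by
  rw [pvVec_get n i f 0 h0 h, pvVec_set n i f _ h0 h]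
  apply pvVec_congr
  intro k _ _
  by_cases hc : k = i
  · subst hc; simp
  · rw [if_neg hc, if_neg (fun hh => hc hh.symm)]; ring

-- one non-diagonal, not-yet-done step
lemma adj_step (n : Int) (C : Int → Int → Int) (S : Int → Int) (cnt : PySem.Dict (Int × Int) Int)
    (hcnt : ∀ q : Int × Int, cnt.getD q 0 = C q.1 q.2)
    (q : Int × Int) (hq10 : 0 ≤ q.1) (hq1n : q.1 < n) (hq20 : 0 ≤ q.2) (hq2n : q.2 < n)
    (w : Int → Int) :
    (if cnt.getD q 0 ≠ cnt.getD (q.2, q.1) 0 then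
        ((PySem.List.pySetD
          (if PySem.List.pyGetD (pvVec n S) q.1 0 > PySem.List.pyGetD (pvVec n S) q.2 0 then
            PySem.List.pySetD (pvVec n w) q.1 (PySem.List.pyGetD (pvVec n w) q.1 0 - 1)
          else if PySem.List.pyGetD (pvVec n S) q.2 0 > PySem.List.pyGetD (pvVec n S) q.1 0 then
            PySem.List.pySetD (pvVec n w) q.2 (PySem.List.pyGetD (pvVec n w) q.2 0 - 1)
          else pvVec n w)
          (if cnt.getD q 0 > cnt.getD (q.2, q.1) 0 then q.1 else q.2)
          (PySem.List.pyGetD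
            (if PySem.List.pyGetD (pvVec n S) q.1 0 > PySem.List.pyGetD (pvVec n S) q.2 0 then
              PySem.List.pySetD (pvVec n w) q.1 (PySem.List.pyGetD (pvVec n w) q.1 0 - 1)
            else if PySem.List.pyGetD (pvVec n S) q.2 0 > PySem.List.pyGetD (pvVec n S) q.1 0 then
              PySem.List.pySetD (pvVec n w) q.2 (PySem.List.pyGetD (pvVec n w) q.2 0 - 1)
            else pvVec n w)
            (if cnt.getD q 0 > cnt.getD (q.2, q.1) 0 then q.1 else q.2) 0 + 1)) : List Int)
      else pvVec n w)
    = pvVec n (fun k => w k + pvAdjK C S q k) := by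
  rw [hcnt q, hcnt (q.2, q.1)]
  simp only []
  rw [pvVec_get n q.1 S 0 hq10 hq1n, pvVec_get n q.2 S 0 hq20 hq2n]
  by_cases hasym : C q.1 q.2 ≠ C q.2 q.1
  · rw [if_pos hasym]
    by_cases hs1 : S q.1 > S q.2
    · rw [if_pos hs1, pvSetD_sub1 n q.1 w hq10 hq1n]
      by_cases hcw : C q.1 q.2 > C q.2 q.1
      · rw [if_pos hcw, pvSetD_add1 n q.1 _ hq10 hq1n]
        apply pvVec_congr; intro k _ _
        unfold pvAdjK
        rw [if_pos hasym, if_pos hcw, if_pos hs1]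
        split_ifs <;> omega
      · rw [if_neg hcw, pvSetD_add1 n q.2 _ hq20 hq2n]
        apply pvVec_congr; intro k _ _
        unfold pvAdjK
        rw [if_pos hasym, if_neg hcw, if_pos hs1]
        split_ifs <;> omega
    · rw [if_neg hs1]
      by_cases hs2 : S q.2 > S q.1
      · rw [if_pos hs2, pvSetD_sub1 n q.2 w hq20 hq2n]
        by_cases hcw : C q.1 q.2 > C q.2 q.1
        · rw [if_pos hcw, pvSetD_add1 n q.1 _ hq10 hq1n]
          apply pvVec_congr; intro k _ _
          unfold pvAdjK
          rw [if_pos hasym, if_pos hcw, if_neg hs1, if_pos hs2]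
          split_ifs <;> omega
        · rw [if_neg hcw, pvSetD_add1 n q.2 _ hq20 hq2n]
          apply pvVec_congr; intro k _ _
          unfold pvAdjK
          rw [if_pos hasym, if_neg hcw, if_neg hs1, if_pos hs2]
          split_ifs <;> omega
      · rw [if_neg hs2]
        by_cases hcw : C q.1 q.2 > C q.2 q.1
        · rw [if_pos hcw, pvSetD_add1 n q.1 w hq10 hq1n]
          apply pvVec_congr; intro k _ _
          unfold pvAdjK
          rw [if_pos hasym, if_pos hcw, if_neg hs1, if_neg hs2]
          split_ifs <;> omega
        · rw [if_neg hcw, pvSetD_add1 n q.2 w hq20 hq2n]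
          apply pvVec_congr; intro k _ _
          unfold pvAdjK
          rw [if_pos hasym, if_neg hcw, if_neg hs1, if_neg hs2]
          split_ifs <;> omega
  · rw [if_neg hasym]
    apply pvVec_congr; intro k _ _
    unfold pvAdjK
    rw [if_neg hasym]
    ring

lemma adj_step_full (n : Int) (C : Int → Int → Int) (S : Int → Int)
    (cnt : PySem.Dict (Int × Int) Int) (hcnt : ∀ q : Int × Int, cnt.getD q 0 = C q.1 q.2)
    (done : PySem.Set (Int × Int)) (w : Int → Int) (p q : Int × Int)
    (hdiag : ¬ p.1 = p.2) (hqdef : (if p.1 < p.2 then p else (p.2, p.1)) = q)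
    (hcont : PySem.Set.contains done q = false)
    (hq10 : 0 ≤ q.1) (hq1n : q.1 < n) (hq20 : 0 ≤ q.2) (hq2n : q.2 < n) :
    pvAdjStepB cnt (pvVec n S) (pvVec n w, done) p
      = (pvVec n (fun k => w k + pvAdjK C S q k), PySem.Set.add done q) := by
  unfold pvAdjStepB
  rw [if_neg hdiag]
  dsimp only
  rw [hqdef, if_neg (by rw [hcont]; decide)]
  by_cases hasymc : cnt.getD q 0 ≠ cnt.getD (q.2, q.1) 0
  · rw [if_pos hasymc]
    refine congrArg₂ Prod.mk ?_ rfl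
    have h := adj_step n C S cnt hcnt q hq10 hq1n hq20 hq2n w
    rw [if_pos hasymc] at h
    exact h
  · rw [if_neg hasymc]
    refine congrArg₂ Prod.mk ?_ rfl
    rw [hcnt q, hcnt (q.2, q.1)] at hasymc
    apply pvVec_congr
    intro k _ _
    unfold pvAdjK
    rw [if_neg hasymc]
    ring

lemma adj_fold (n : Int) (C : Int → Int → Int) (S : Int → Int) (cnt : PySem.Dict (Int × Int) Int)
    (hcnt : ∀ q : Int × Int, cnt.getD q 0 = C q.1 q.2) :
    ∀ (ks : List (Int × Int)),
      (∀ p ∈ ks, 0 ≤ p.1 ∧ p.1 < n ∧ 0 ≤ p.2 ∧ p.2 < n) →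
      ∀ (done : PySem.Set (Int × Int)) (w : Int → Int),
      ks.foldl (pvAdjStepB cnt (pvVec n S)) (pvVec n w, done)
        = (pvVec n (fun k => w k + ((pvNew done (ks.filterMap pvNorm)).map (fun q => pvAdjK C S q k)).sum),
           PySem.Set.update done (ks.filterMap pvNorm)) := by
  intro ks
  induction ks with
  | nil =>
    intro _ done w
    simp only [List.foldl_nil, List.filterMap_nil]
    refine congrArg₂ Prod.mk ?_ rfl
    apply pvVec_congr
    intro k _ _
    simp [pvNew, PySem.Set.ofList]
  | cons p ks ih =>
    intro hb done w
    obtain ⟨hp10, hp1n, hp20, hp2n⟩ := hb p (List.mem_cons_self ..)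
    simp only [List.foldl_cons, List.filterMap_cons]
    by_cases hdiag : p.1 = p.2
    · have hn : pvNorm p = none := by simp [pvNorm, hdiag]
      have hstep : pvAdjStepB cnt (pvVec n S) (pvVec n w, done) p = (pvVec n w, done) := by
        unfold pvAdjStepB
        rw [if_pos hdiag]
      rw [hstep, hn]
      exact ih (fun x hx => hb x (List.mem_cons_of_mem _ hx)) done w
    · have hq : ∃ q : Int × Int, (if p.1 < p.2 then p else (p.2, p.1)) = q := ⟨_, rfl⟩
      obtain ⟨q, hqdef⟩ := hq
      have hn : pvNorm p = some q := by
        unfold pvNorm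
        rw [if_neg hdiag]
        by_cases hplt : p.1 < p.2
        · rw [if_pos hplt]; rw [if_pos hplt] at hqdef; rw [hqdef]
        · rw [if_neg hplt]; rw [if_neg hplt] at hqdef; rw [hqdef]
      have hqb : 0 ≤ q.1 ∧ q.1 < n ∧ 0 ≤ q.2 ∧ q.2 < n := by
        by_cases hplt : p.1 < p.2
        · rw [if_pos hplt] at hqdef; subst hqdef; exact ⟨hp10, hp1n, hp20, hp2n⟩
        · rw [if_neg hplt] at hqdef; subst hqdef; exact ⟨hp20, hp2n, hp10, hp1n⟩
      obtain ⟨hq10, hq1n, hq20, hq2n⟩ := hqb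
      rw [hn]
      by_cases hdone : q ∈ done
      · have hcont : PySem.Set.contains done q = true := by
          simp only [PySem.Set.contains, List.contains_iff_mem]
          exact hdone
        have hstep : pvAdjStepB cnt (pvVec n S) (pvVec n w, done) p = (pvVec n w, done) := by
          unfold pvAdjStepB
          rw [if_neg hdiag]
          dsimp only
          rw [hqdef, if_pos (by rw [hcont])]
        rw [hstep, ih (fun x hx => hb x (List.mem_cons_of_mem _ hx)) done w,
            pvNew_cons_mem done q _ hdone, PySem.Set.update_cons, PySem.Set.add_of_mem hdone]
      · have hcont : PySem.Set.contains done q = false := by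
          simp only [PySem.Set.contains]
          rw [← Bool.not_eq_true]
          intro hc
          exact hdone (List.contains_iff_mem.mp hc)
        rw [adj_step_full n C S cnt hcnt done w p q hdiag hqdef hcont hq10 hq1n hq20 hq2n]
        rw [PySem.Set.add_of_not_mem hdone]
        rw [ih (fun x hx => hb x (List.mem_cons_of_mem _ hx)) (done ++ [q])
              (fun k => w k + pvAdjK C S q k)]
        rw [pvNew_cons_not_mem done q _ hdone, PySem.Set.update_cons,
            PySem.Set.add_of_not_mem hdone]
        refine congrArg₂ Prod.mk ?_ rfl
        apply pvVec_congr
        intro k _ _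
        simp only [List.map_cons, List.sum_cons]
        ring

lemma sum_filter_of_zero {α : Type} (l : List α) (p : α → Bool) (f : α → Int)
    (h : ∀ x ∈ l, p x = false → f x = 0) :
    (l.map f).sum = ((l.filter p).map f).sum := by
  induction l with
  | nil => rfl
  | cons a l ih =>
    cases hp : p a with
    | true =>
      simp only [List.map_cons, List.sum_cons, List.filter_cons, hp, if_pos]
      rw [ih (fun x hx => h x (by simp [hx]))]
    | false =>
      simp [hp, h a (List.mem_cons_self ..) hp, ih (fun x hx => h x (by simp [hx]))]
  
lemma sum_map_filter {α : Type} (l : List α) (p : α → Bool) (f : α → Int) :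
    ((l.filter p).map f).sum = (l.map (fun x => if p x then f x else 0)).sum := by
  induction l with
  | nil => rfl
  | cons a l ih =>
    cases hp : p a with
    | true =>
      simp only [List.filter_cons, List.map_cons, List.sum_cons, hp, if_pos]
      rw [ih]
    | false =>
      simp [hp, ih]

lemma sum_nodup_sub (Sl : List Int) (hS : Sl.Nodup) (f : Int → Int) (R : List Int)
    (hR : R.Nodup) (hsub : ∀ x ∈ Sl, x ∈ R) :
    (Sl.map f).sum = ((R.filter (fun x => decide (x ∈ Sl))).map f).sum := by
  have hperm : Sl.Perm (R.filter (fun x => decide (x ∈ Sl))) := by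
    rw [List.perm_ext_iff_of_nodup hS (hR.filter _)]
    intro a
    simp only [List.mem_filter, decide_eq_true_eq]
    exact ⟨fun ha => ⟨hsub a ha, ha⟩, fun ha => ha.2⟩
  exact (hperm.map f).sum_eq

-- inverting the normalisation
lemma pvNorm_some_inv (p q : Int × Int) (h : pvNorm p = some q) :
    (q = p ∨ q = (p.2, p.1)) ∧ q.1 < q.2 := by
  unfold pvNorm at h
  by_cases hd : p.1 = p.2
  · rw [if_pos hd] at h; cases h
  · rw [if_neg hd] at h
    by_cases hlt : p.1 < p.2
    · rw [if_pos hlt] at h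
      cases h
      exact ⟨Or.inl rfl, hlt⟩
    · rw [if_neg hlt] at h
      cases h
      exact ⟨Or.inr rfl, by omega⟩

def pvPairK (k j : Int) : Int × Int := if k < j then (k, j) else (j, k)

lemma pvPairK_comm (k j : Int) (hjk : j ≠ k) : pvPairK j k = pvPairK k j := by
  unfold pvPairK
  split_ifs <;> first | rfl | (exfalso; omega)

lemma pvNorm_pair (i j : Int) (hij : i ≠ j) : pvNorm (i, j) = some (pvPairK i j) := by
  unfold pvNorm pvPairK
  rw [if_neg (by simpa using hij)]
  dsimp only
  split_ifs <;> rfl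

lemma pvAdjK_pairK (C : Int → Int → Int) (S : Int → Int) (k j : Int)
    (hjk : j ≠ k) (hasym : C k j ≠ C j k) :
    pvAdjK C S (pvPairK k j) k
      = (if C k j > C j k then 1 else 0) - (if S k > S j then 1 else 0) := by
  unfold pvAdjK pvPairK
  by_cases hkj : k < j
  · rw [if_pos hkj]
    simp only []
    rw [if_pos hasym]
    split_ifs <;> omega
  · rw [if_neg hkj]
    simp only []
    rw [if_pos (fun hc => hasym hc.symm)]
    split_ifs <;> omega

lemma pvAdjK_pairK_zero (C : Int → Int → Int) (S : Int → Int) (k j : Int)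
    (hsym : C k j = C j k) :
    pvAdjK C S (pvPairK k j) k = 0 := by
  unfold pvAdjK pvPairK
  by_cases hkj : k < j
  · rw [if_pos hkj]
    simp only []
    rw [if_neg (by simpa using hsym)]
  · rw [if_neg hkj]
    simp only []
    rw [if_neg (by simpa using hsym.symm)]

-- the per-index identity: base score-rank plus corrections = A's per-row count
lemma final_identity (fr gi : List String) (h : fr ≠ []) (D : List (Int × Int))
    (hnd : D.Nodup)
    (hmem : ∀ q : Int × Int, q ∈ D ↔ ∃ p ∈ pvPairs fr gi, pvNorm p = some q)
    (k : Int) (hk0 : 0 ≤ k) (hkn : k < (fr.length : Int)) :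
    (((PySem.List.pyRange 0 (fr.length : Int) 1).countP
        (fun j => decide (pvS fr gi j < pvS fr gi k))) : Int)
      + ((D.map (fun q => pvAdjK (pvC fr gi) (pvS fr gi) q k)).sum)
      = pvResA fr gi k := by
  have hDprop : ∀ q ∈ D, q.1 < q.2 ∧ 0 ≤ q.1 ∧ q.1 < (fr.length : Int)
      ∧ 0 ≤ q.2 ∧ q.2 < (fr.length : Int) := by
    intro q hq
    obtain ⟨p, hp, hpn⟩ := (hmem q).mp hq
    obtain ⟨hc, hlt⟩ := pvNorm_some_inv p q hpn
    obtain ⟨b1, b2, b3, b4⟩ := pvPairs_bounds fr gi h p hp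
    rcases hc with rfl | rfl
    · exact ⟨hlt, b1, b2, b3, b4⟩
    · exact ⟨hlt, b3, b4, b1, b2⟩
  -- drop pairs not containing k
  have h1 : (D.map (fun q => pvAdjK (pvC fr gi) (pvS fr gi) q k)).sum
      = ((D.filter (fun q => decide (q.1 = k ∨ q.2 = k))).map
          (fun q => pvAdjK (pvC fr gi) (pvS fr gi) q k)).sum := by
    apply sum_filter_of_zero
    intro q _ hq
    simp only [decide_eq_false_iff_not, not_or] at hq
    unfold pvAdjK
    split_ifs <;> omega
  -- each remaining pair is the normalised pair of k and its other member
  have hrec : ∀ q ∈ D.filter (fun q => decide (q.1 = k ∨ q.2 = k)),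
      pvPairK k (q.1 + q.2 - k) = q ∧ q.1 + q.2 - k ≠ k := by
    intro q hq
    obtain ⟨hqD, hqk⟩ := List.mem_filter.mp hq
    obtain ⟨hlt, _, _, _, _⟩ := hDprop q hqD
    simp only [decide_eq_true_eq] at hqk
    rcases hqk with hk1 | hk2
    · constructor
      · unfold pvPairK
        rw [if_pos (by omega)]
        refine Prod.ext ?_ ?_ <;> simp [hk1] <;> omega
      · omega
    · constructor
      · unfold pvPairK
        rw [if_neg (by omega)]
        refine Prod.ext ?_ ?_ <;> simp [hk2] <;> omega
      · omega
  have h2 : ((D.filter (fun q => decide (q.1 = k ∨ q.2 = k))).map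
        (fun q => pvAdjK (pvC fr gi) (pvS fr gi) q k)).sum
      = (((D.filter (fun q => decide (q.1 = k ∨ q.2 = k))).map (fun q => q.1 + q.2 - k)).map
          (fun j => pvAdjK (pvC fr gi) (pvS fr gi) (pvPairK k j) k)).sum := by
    rw [List.map_map]
    apply congrArg List.sum
    apply List.map_congr_left
    intro q hq
    simp only [Function.comp_apply]
    rw [(hrec q hq).1]
  have hJnd : ((D.filter (fun q => decide (q.1 = k ∨ q.2 = k))).map
        (fun q => q.1 + q.2 - k)).Nodup := by
    apply List.Nodup.map_on
    · intro x hx y hy hxy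
      have hx1 := (hrec x hx).1
      have hy1 := (hrec y hy).1
      rw [← hx1, ← hy1, hxy]
    · exact hnd.filter _
  have hJmem : ∀ j : Int, (j ∈ (D.filter (fun q => decide (q.1 = k ∨ q.2 = k))).map
        (fun q => q.1 + q.2 - k)) ↔ (pvPairK k j ∈ D ∧ j ≠ k) := by
    intro j
    constructor
    · intro hj
      obtain ⟨q, hq, hqe⟩ := List.mem_map.mp hj
      obtain ⟨h1', h2'⟩ := hrec q hq
      subst hqe
      rw [h1']
      exact ⟨(List.mem_filter.mp hq).1, h2'⟩
    · rintro ⟨hD, hjk⟩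
      apply List.mem_map.mpr
      refine ⟨pvPairK k j, ?_, ?_⟩
      · apply List.mem_filter.mpr
        refine ⟨hD, ?_⟩
        unfold pvPairK
        split_ifs <;> simp
      · unfold pvPairK
        split_ifs <;> simp <;> omega
    
  have hJb : ∀ j ∈ (D.filter (fun q => decide (q.1 = k ∨ q.2 = k))).map
        (fun q => q.1 + q.2 - k), j ∈ PySem.List.pyRange 0 (fr.length : Int) 1 := by
    intro j hj
    obtain ⟨hD, hjk⟩ := (hJmem j).mp hj
    obtain ⟨_, c1, c2, c3, c4⟩ := hDprop _ hD
    rw [PySem.List.mem_pyRange_one]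
    unfold pvPairK at c1 c2 c3 c4
    by_cases hkj : k < j
    · rw [if_pos hkj] at c1 c2 c3 c4; simp at c1 c2 c3 c4; omega
    · rw [if_neg hkj] at c1 c2 c3 c4; simp at c1 c2 c3 c4; omega
  have h3 := sum_nodup_sub _ hJnd
      (fun j => pvAdjK (pvC fr gi) (pvS fr gi) (pvPairK k j) k)
      (PySem.List.pyRange 0 (fr.length : Int) 1) (PySem.List.nodup_pyRange_one _ _) hJb
  rw [h1, h2, h3, sum_map_filter]
  unfold pvResA
  rw [← PySem.List.sum_map_ite_one_zero
        (fun j => decide (pvS fr gi j < pvS fr gi k)) (PySem.List.pyRange 0 (fr.length : Int) 1),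
      ← PySem.List.sum_map_ite_one_zero
        (fun j => !decide (k = j) && pvBeatsB (pvC fr gi) (pvS fr gi) k j)
        (PySem.List.pyRange 0 (fr.length : Int) 1),
      ← PySem.List.sum_map_add_int]
  apply congrArg List.sum
  apply List.map_congr_left
  intro j hjR
  rw [PySem.List.mem_pyRange_one] at hjR
  by_cases hjk : j = k
  · subst hjk
    have hJ : ¬ (j ∈ (D.filter (fun q => decide (q.1 = j ∨ q.2 = j))).map
        (fun q => q.1 + q.2 - j)) := fun hc => ((hJmem j).mp hc).2 rfl
    rw [if_neg (by simp only [decide_eq_true_eq]; omega),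
        if_neg (by simp only [decide_eq_true_eq]; exact hJ),
        if_neg (by simp)]
    norm_num
  · have hkj' : ¬ (k = j) := fun hc => hjk hc.symm
    by_cases hasym : pvC fr gi k j = pvC fr gi j k
    · have hz : (if decide (j ∈ (D.filter (fun q => decide (q.1 = k ∨ q.2 = k))).map
          (fun q => q.1 + q.2 - k)) = true
          then pvAdjK (pvC fr gi) (pvS fr gi) (pvPairK k j) k else 0) = 0 := by
        split_ifs
        · exact pvAdjK_pairK_zero _ _ k j hasym
        · rfl
      rw [hz]
      have hbeats : (!decide (k = j) && pvBeatsB (pvC fr gi) (pvS fr gi) k j)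
          = decide (pvS fr gi k > pvS fr gi j) := by
        simp [pvBeatsB, hkj', hasym]
      rw [hbeats]
      simp only [decide_eq_true_eq]
      split_ifs <;> omega
    · -- asymmetric pair: it is present in D
      have hpres : pvPairK k j ∈ D := by
        have hone : (k, j) ∈ pvPairs fr gi ∨ (j, k) ∈ pvPairs fr gi := by
          by_contra hno
          push_neg at hno
          have e1 : (pvPairs fr gi).count (k, j) = 0 := List.count_eq_zero.mpr hno.1
          have e2 : (pvPairs fr gi).count (j, k) = 0 := List.count_eq_zero.mpr hno.2
          apply hasym
          unfold pvC
          rw [e1, e2]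
        rcases hone with hone | hone
        · exact (hmem _).mpr ⟨(k, j), hone, pvNorm_pair k j hkj'⟩
        · refine (hmem _).mpr ⟨(j, k), hone, ?_⟩
          rw [pvNorm_pair j k hjk, pvPairK_comm k j hjk]
      have hJ : j ∈ (D.filter (fun q => decide (q.1 = k ∨ q.2 = k))).map
          (fun q => q.1 + q.2 - k) := (hJmem j).mpr ⟨hpres, hjk⟩
      rw [decide_eq_true hJ, pvIfTrue, pvAdjK_pairK _ _ k j hjk hasym]
      have hbeats : (!decide (k = j) && pvBeatsB (pvC fr gi) (pvS fr gi) k j)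
          = decide (pvC fr gi k j > pvC fr gi j k) := by
        have hb2 : decide (pvC fr gi k j = pvC fr gi j k) = false := by
          simp [hasym]
        simp [pvBeatsB, hkj', hb2]
      rw [hbeats]
      simp only [decide_eq_true_eq]
      split_ifs <;> omega

lemma solB (fr gi : List String) (h : fr ≠ []) :
    solution_alt fr gi
      = (PySem.List.max? (pvVec (fr.length : Int) (pvResA fr gi)) (fun x => x)).getD 0 := by
  have hn0 : 0 < (fr.length : Int) := by
    have := List.length_pos_iff.mpr h; omega
  obtain ⟨hb1, hb2, hb3⟩ := B_fold fr h gi (fun _ => 0) PySem.Dict.empty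
  simp only [solution_alt]
  rw [PySem.List.enumerate_eq_map_pyRange fr ""]
  simp only [List.foldl_map]
  have hlenfr : PySem.List.len fr = (fr.length : Int) := rfl
  rw [hlenfr, pvIdx_eq, replicate_pvVec fr.length (0 : Int)]
  rw [hb1]
  have hsc : (pvVec (fr.length : Int) (fun k =>
        0 + ((gi.filterMap (pvPairOf fr)).countP (fun p => p.1 == k) : Int)
          - ((gi.filterMap (pvPairOf fr)).countP (fun p => p.2 == k) : Int)))
      = pvVec (fr.length : Int) (pvS fr gi) := by
    apply pvVec_congr
    intro k _ _
    simp [pvS, pvGive, pvRecv, pvPairs]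
  rw [hsc]
  have hsslen : (PySem.List.sorted (pvVec (fr.length : Int) (pvS fr gi)) (fun x => x) false).length
      = fr.length := by
    rw [PySem.List.length_sorted]
    simp [pvVec, PySem.List.length_pyRange_one]
  -- the comprehension [first[s] for s in score] is the base ranks vector
  have hwin : (pvVec (fr.length : Int) (pvS fr gi)).map (fun s =>
        ((PySem.List.pyRange ((fr.length : Int) - 1) (-1) (-1)).foldl
          (fun d r => d.insert (PySem.List.pyGetD
            (PySem.List.sorted (pvVec (fr.length : Int) (pvS fr gi)) (fun x => x) false) r 0) r)
          PySem.Dict.empty).getD s 0)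
      = pvVec (fr.length : Int) (fun k =>
          (((PySem.List.pyRange 0 (fr.length : Int) 1).countP
            (fun j => decide (pvS fr gi j < pvS fr gi k))) : Int)) := by
    have hmapmap : ∀ g : Int → Int, (pvVec (fr.length : Int) (pvS fr gi)).map g
        = pvVec (fr.length : Int) (fun k => g (pvS fr gi k)) := by
      intro g
      unfold pvVec
      rw [List.map_map]
      rfl
    rw [hmapmap]
    apply pvVec_congr
    intro k hk0 hkn
    rw [PySem.Dict.getD_eq_get?_getD]
    have hff := first_fold
        (PySem.List.sorted (pvVec (fr.length : Int) (pvS fr gi)) (fun x => x) false)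
        fr.length (le_of_eq hsslen.symm) PySem.Dict.empty (pvS fr gi k)
    rw [hff]
    have htake : (PySem.List.sorted (pvVec (fr.length : Int) (pvS fr gi)) (fun x => x) false).take fr.length
        = PySem.List.sorted (pvVec (fr.length : Int) (pvS fr gi)) (fun x => x) false := by
      exact List.take_of_length_le (le_of_eq hsslen)
    rw [htake]
    have hmemk : pvS fr gi k ∈ PySem.List.sorted (pvVec (fr.length : Int) (pvS fr gi)) (fun x => x) false := by
      rw [PySem.List.mem_sorted]
      unfold pvVec
      exact List.mem_map.mpr ⟨k, PySem.List.mem_pyRange_one.mpr ⟨hk0, hkn⟩, rfl⟩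
    rw [if_pos hmemk, Option.getD_some]
    have hidx := idxOf_sorted
        (PySem.List.sorted (pvVec (fr.length : Int) (pvS fr gi)) (fun x => x) false)
        (PySem.List.sorted_pairwise (pvVec (fr.length : Int) (pvS fr gi)) (fun x => x))
        (pvS fr gi k) hmemk
    rw [hidx]
    have hcp : (PySem.List.sorted (pvVec (fr.length : Int) (pvS fr gi)) (fun x => x) false).countP
          (fun x => decide (x < pvS fr gi k))
        = (PySem.List.pyRange 0 (fr.length : Int) 1).countP
          (fun j => decide (pvS fr gi j < pvS fr gi k)) := by
      rw [(PySem.List.sorted_perm (pvVec (fr.length : Int) (pvS fr gi)) (fun x => x) false).countP_eq]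
      unfold pvVec
      rw [List.countP_map]
      rfl
    rw [hcp]
  rw [hwin]
  -- the correction loop over the counter's keys
  have hkeys : (gi.foldl (pvGiftStepB (pvIdx fr)) (pvVec (fr.length : Int) (fun _ => 0), PySem.Dict.empty)).2.keys
      = PySem.Set.ofList (gi.filterMap (pvPairOf fr)) := by
    rw [hb3]
    rfl
  rw [hkeys]
  have hcnt : ∀ q : Int × Int,
      (gi.foldl (pvGiftStepB (pvIdx fr)) (pvVec (fr.length : Int) (fun _ => 0), PySem.Dict.empty)).2.getD q 0
        = pvC fr gi q.1 q.2 := by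
    intro q
    rw [hb2 q, dict_empty_getD]
    simp [pvC, pvPairs]
  have hbounds : ∀ p ∈ PySem.Set.ofList (gi.filterMap (pvPairOf fr)),
      0 ≤ p.1 ∧ p.1 < (fr.length : Int) ∧ 0 ≤ p.2 ∧ p.2 < (fr.length : Int) := by
    intro p hp
    exact pvPairs_bounds fr gi h p ((PySem.Set.mem_ofList _ _).mp hp)
  rw [adj_fold (fr.length : Int) (pvC fr gi) (pvS fr gi) _ hcnt
        (PySem.Set.ofList (gi.filterMap (pvPairOf fr))) hbounds PySem.Set.empty
        (fun k => (((PySem.List.pyRange 0 (fr.length : Int) 1).countP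
            (fun j => decide (pvS fr gi j < pvS fr gi k))) : Int))]
  have hnew : pvNew PySem.Set.empty
        ((PySem.Set.ofList (gi.filterMap (pvPairOf fr))).filterMap pvNorm)
      = PySem.Set.ofList ((PySem.Set.ofList (gi.filterMap (pvPairOf fr))).filterMap pvNorm) := by
    unfold pvNew
    apply List.filter_eq_self.mpr
    intro q _
    rfl
  rw [hnew]
  have hfin : pvVec (fr.length : Int) (fun k =>
        (((PySem.List.pyRange 0 (fr.length : Int) 1).countP
            (fun j => decide (pvS fr gi j < pvS fr gi k))) : Int)
        + ((PySem.Set.ofList ((PySem.Set.ofList (gi.filterMap (pvPairOf fr))).filterMap pvNorm)).map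
            (fun q => pvAdjK (pvC fr gi) (pvS fr gi) q k)).sum)
      = pvVec (fr.length : Int) (pvResA fr gi) := by
    apply pvVec_congr
    intro k hk0 hkn
    apply final_identity fr gi h _ (PySem.Set.nodup_ofList _) _ k hk0 hkn
    intro q
    rw [PySem.Set.mem_ofList, List.mem_filterMap]
    constructor
    · rintro ⟨p, hp, hpn⟩
      exact ⟨p, (PySem.Set.mem_ofList _ _).mp hp, hpn⟩
    · rintro ⟨p, hp, hpn⟩
      exact ⟨p, (PySem.Set.mem_ofList _ _).mpr hp, hpn⟩
  rw [hfin]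

-- ===== VERDICT (by name: the statement is the Claim_ definition above) =====
theorem solution_spec : Claim_equal_solution := by
  intro friends gifts _ hpre
  unfold Spec_solution
  obtain ⟨h, _⟩ := hpre
  rw [solA friends gifts h, solB friends gifts h]
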